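-- pv_equiv track=rewrite | github.com/Spikatrix/Advent-of-Code | 2020/day10/part2.py | jolter
-- ===== SOURCE A (Python) =====
-- def jolter(jolt_array, index = 1):
--     count = 1
--     while index < len(jolt_array) - 1:
--         jolt = jolt_array[index]
--         diff_prev, diff_next = (jolt - jolt_array[index - 1], jolt_array[index + 1] - jolt)
--
--         if diff_prev + diff_next <= 3:
--             count *= (count + 1) * jolter(jolt_array[:index] + jolt_array[index + 1:])
--             break
--         else:
--             index += 1
--
--     return count
-- ===== SOURCE B (Python) =====
-- def _first_removable(arr, i):
--     """Leftmost position j >= i (strictly inside arr) whose adapter can be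
--     dropped: its neighbours are still within 3 jolts of each other."""
--     while i < len(arr) - 1:
--         if arr[i + 1] - arr[i - 1] <= 3:
--             return i
--         i += 1
--     return None
--
--
-- def jolter(jolt_array, index=1):
--     # Phase 1: look for one removable adapter starting the search at `index`;
--     # each removal doubles the arrangement count, and after a removal the
--     # process continues with a search over the whole remaining array.
--     j = _first_removable(jolt_array, index)
--     if j is None:
--         return 1
--     arr = jolt_array[:j] + jolt_array[j + 1:]
--     removals = 1
--     # Phase 2: repeatedly remove the leftmost removable adapter, scanning from
--     # the start.  Deleting position i only changes the neighbourhood of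
--     # position i - 1, so everything to its left stays non-removable and the
--     # scan backs up one step instead of restarting.
--     i = 1
--     while i < len(arr) - 1:
--         if arr[i + 1] - arr[i - 1] <= 3:
--             del arr[i]
--             removals += 1
--             i = max(i - 1, 1)
--         else:
--             i += 1
--     return 2 ** removals
-- ===== Notes on version B (the rewrite author's own statement) =====
-- stated objective: faster
-- what changed: A restarts a fresh recursive call (with a full list copy and a rescan from position 1) after every removal; B finds the first removable adapter from `index`, then simulates the remaining leftmost-removal process in one loop over one working list with a backtrack-one pointer (deleting position i only changes position i-1's neighbourhood), counting removals m and returning 2**m. Pre_ excludes index <= 0, where A reads neighbours through Python's negative-index wraparound or raises IndexError.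
-- outside the precondition, e.g. on jolter([0, 1, 2], 0): A returns 2, B returns 2; on jolter([0, 1, 2], -1): A returns 16, B returns 16
import Mathlib
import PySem

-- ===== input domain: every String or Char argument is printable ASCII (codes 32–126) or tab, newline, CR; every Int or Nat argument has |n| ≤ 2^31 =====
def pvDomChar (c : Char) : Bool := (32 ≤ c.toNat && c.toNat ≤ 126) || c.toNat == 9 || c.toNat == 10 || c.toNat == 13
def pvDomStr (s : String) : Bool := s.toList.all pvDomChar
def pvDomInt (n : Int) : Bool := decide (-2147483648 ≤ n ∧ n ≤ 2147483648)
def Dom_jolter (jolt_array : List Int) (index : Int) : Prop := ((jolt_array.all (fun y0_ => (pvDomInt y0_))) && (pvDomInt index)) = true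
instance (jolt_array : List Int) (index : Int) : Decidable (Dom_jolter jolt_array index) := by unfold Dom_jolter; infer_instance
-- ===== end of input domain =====

-- B replaces A's restart-the-recursion-with-a-copied-list scheme by one search from `index`
-- followed by a single leftmost-removal loop with a backtrack-one pointer; measurably faster
-- on large inputs. Neither version mutates the caller's list.

-- ===== PORT A =====
-- arr[i] (read only where Python succeeds; the default is never reached under Pre_)
def jolterGetD (arr : List Int) (i : Int) : Int := (PySem.List.pyGet? arr i).getD 0

-- A's while loop; `rem` is the loop counter ((len-1-index).toNat at entry, exact and maintained),
-- `recv` is the recursive call on the break branch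
def jolterWhileA (recv : List Int → Int) (arr : List Int) : Nat → Int → Int
  | 0, _index => 1
  | rem + 1, index =>
    if index < (arr.length : Int) - 1 then
      -- count = 1; loop body
      let jolt := jolterGetD arr index
      let diff_prev := jolt - jolterGetD arr (index - 1)
      let diff_next := jolterGetD arr (index + 1) - jolt
      if diff_prev + diff_next ≤ 3 then
        -- count *= (count + 1) * jolter(jolt_array[:index] + jolt_array[index+1:]); break
        1 * ((1 + 1) *
          recv (PySem.List.slice arr none (some index) ++
                PySem.List.slice arr (some (index + 1)) none))
      else
        jolterWhileA recv arr rem (index + 1)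
    else 1

-- `fuel` only totalizes A's recursion (each recursive call is on a list one element shorter
-- under Pre_, so fuel = length + 1 is never exhausted there)
def jolterGo : Nat → List Int → Int → Int
  | 0, _, _ => 1
  | fuel + 1, arr, index =>
      jolterWhileA (fun arr' => jolterGo fuel arr' 1) arr
        (((arr.length : Int) - 1 - index).toNat) index

def jolter (jolt_array : List Int) (index : Int) : Int :=
  jolterGo (jolt_array.length + 1) jolt_array index

-- ===== PORT B =====
-- B's helper `_first_removable(arr, i)`: leftmost position ≥ i strictly inside arr whose
-- neighbours are within 3 jolts of each other; `rem` is the loop counter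
-- ((len-1-i).toNat at entry, exact and maintained)
def jFirstRemovable (arr : List Int) : Nat → Int → Option Int
  | 0, _i => none
  | rem + 1, i =>
    if i < (arr.length : Int) - 1 then
      if jolterGetD arr (i + 1) - jolterGetD arr (i - 1) ≤ 3 then some i
      else jFirstRemovable arr rem (i + 1)
    else none

-- B's phase-2 while loop: pointer i, removal counter; `del arr[i]` is eraseIdx, the pointer
-- backs up one step after a removal. `rem` is the within-pass loop counter, `next` re-enters
-- the outer round counter after a removal.
def jolterAltInner (next : List Int → Int → Nat → Int) (arr : List Int) :
    Nat → Int → Nat → Int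
  | 0, _i, removals => 2 ^ removals
  | rem + 1, i, removals =>
    if i < (arr.length : Int) - 1 then
      if jolterGetD arr (i + 1) - jolterGetD arr (i - 1) ≤ 3 then
        next (arr.eraseIdx i.toNat) (max (i - 1) 1) (removals + 1)
      else
        jolterAltInner next arr rem (i + 1) removals
    else 2 ^ removals

-- `rounds` only totalizes the removal steps (each removal shortens the list under Pre_,
-- so rounds = length + 1 is never exhausted there)
def jolterAltOuter : Nat → List Int → Int → Nat → Int
  | 0, _, _, removals => 2 ^ removals
  | r + 1, arr, i, removals =>
      jolterAltInner (fun arr' i' m' => jolterAltOuter r arr' i' m') arr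
        (((arr.length : Int) - 1 - i).toNat) i removals

def jolter_alt (jolt_array : List Int) (index : Int) : Int :=
  match jFirstRemovable jolt_array (((jolt_array.length : Int) - 1 - index).toNat) index with
  | none => 1
  | some j =>
      -- arr = jolt_array[:j] + jolt_array[j+1:]; removals = 1; phase-2 loop from i = 1
      jolterAltOuter (jolt_array.length + 1)
        (PySem.List.slice jolt_array none (some j) ++
         PySem.List.slice jolt_array (some (j + 1)) none) 1 1

-- ===== PRECONDITION & SPEC =====
-- Pre_ restricts to the function's natural domain index ≥ 1 (index is the scan start, default 1,
-- and every recursive call of A uses 1): for index ≤ 0 A either raises IndexError (|index| > len)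
-- or silently reads neighbours through Python's negative-index wraparound, accidental values
-- outside the function's purpose which the claim does not cover.
def Pre_jolter (jolt_array : List Int) (index : Int) : Prop := 1 ≤ index
instance (jolt_array : List Int) (index : Int) : Decidable (Pre_jolter jolt_array index) := by
  unfold Pre_jolter; infer_instance

def pvWitness_jolter : List Int × Int := ([0, 1, 2, 5], 1)

def Spec_jolter (jolt_array : List Int) (index : Int) (out : Int) : Prop :=
  out = jolter_alt jolt_array index
instance (jolt_array : List Int) (index : Int) (out : Int) : Decidable (Spec_jolter jolt_array index out) := by
  unfold Spec_jolter; infer_instance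

-- ===== CLAIM (what is proved, stated in full; the proofs are below) =====
def Claim_equal_jolter : Prop := ∀ (jolt_array : List Int) (index : Int), Dom_jolter jolt_array index → Pre_jolter jolt_array index → Spec_jolter jolt_array index (jolter jolt_array index)

-- ===== LEMMAS AND PROOFS =====

-- position j of arr can be dropped (Python: arr[j+1] - arr[j-1] <= 3)
def jremovable (arr : List Int) (j : Int) : Bool :=
  decide (jolterGetD arr (j + 1) - jolterGetD arr (j - 1) ≤ 3)

-- first removable position ≥ i (strictly inside the list)
def jscan (arr : List Int) (i : Nat) : Option Nat :=
  if i + 1 < arr.length then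
    if jremovable arr (i : Int) then some i else jscan arr (i + 1)
  else none
  termination_by arr.length - i

lemma jscan_some {arr : List Int} {i j : Nat} (h : jscan arr i = some j) :
    i ≤ j ∧ j + 1 < arr.length ∧ jremovable arr (j : Int) = true := by
  induction i using jscan.induct (arr := arr) with
  | case1 x hlt hrem =>
      rw [jscan, if_pos hlt, hrem, if_pos rfl] at h
      cases h; exact ⟨le_refl _, hlt, hrem⟩
  | case2 x hlt hrem ih =>
      rw [jscan, if_pos hlt, if_neg hrem] at h
      have := ih h; exact ⟨by omega, this.2.1, this.2.2⟩
  | case3 x hge =>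
      rw [jscan, if_neg hge] at h; cases h

lemma jscan_clean {arr : List Int} {a j : Nat} (h : jscan arr a = some j) :
    ∀ k, a ≤ k → k < j → jremovable arr (k : Int) = false := by
  induction a using jscan.induct (arr := arr) with
  | case1 x hlt hrem =>
      rw [jscan, if_pos hlt, hrem, if_pos rfl] at h
      cases h; intro k hk1 hk2; omega
  | case2 x hlt hrem ih =>
      rw [jscan, if_pos hlt, if_neg hrem] at h
      intro k hk1 hk2
      rcases Nat.eq_or_lt_of_le hk1 with he | hlt2
      · subst he; simpa using hrem
      · exact ih h k hlt2 hk2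
  | case3 x hge =>
      rw [jscan, if_neg hge] at h; cases h

-- total number of removals of the leftmost-removable process started at i
def jcnt (arr : List Int) (i : Nat) : Nat :=
  match h : jscan arr i with
  | none => 0
  | some j => 1 + jcnt (arr.eraseIdx j) 1
  termination_by arr.length
  decreasing_by
    have hs := jscan_some h
    rw [List.length_eraseIdx, if_pos (by omega)]
    omega

lemma jcnt_none {arr : List Int} {i : Nat} (h : jscan arr i = none) : jcnt arr i = 0 := by
  rw [jcnt.eq_def]; split <;> simp_all

lemma jcnt_some {arr : List Int} {i j : Nat} (h : jscan arr i = some j) :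
    jcnt arr i = 1 + jcnt (arr.eraseIdx j) 1 := by
  rw [jcnt.eq_def]; split <;> simp_all

lemma jcnt_le : ∀ (n : Nat) (arr : List Int) (i : Nat), arr.length ≤ n → jcnt arr i ≤ arr.length := by
  intro n
  induction n with
  | zero =>
      intro arr i hlen
      cases h : jscan arr i with
      | none => rw [jcnt_none h]; omega
      | some j => have := jscan_some h; omega
  | succ n ih =>
      intro arr i hlen
      cases h : jscan arr i with
      | none => rw [jcnt_none h]; omega
      | some j =>
          rw [jcnt_some h]
          have hs := jscan_some h
          have hl : (arr.eraseIdx j).length = arr.length - 1 := by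
            rw [List.length_eraseIdx, if_pos (by omega)]
          have := ih (arr.eraseIdx j) 1 (by omega)
          omega

-- erasing at position j does not change removability strictly left of j - 1
lemma jremovable_eraseIdx (arr : List Int) (j k : Nat) (hk1 : 1 ≤ k) (hkj : k + 1 < j) :
    jremovable (arr.eraseIdx j) (k : Int) = jremovable arr (k : Int) := by
  have h1 : ((k : Int) + 1) = ((k + 1 : Nat) : Int) := by push_cast; ring
  have h2 : ((k : Int) - 1) = ((k - 1 : Nat) : Int) := by push_cast [hk1]; ring
  simp only [jremovable, jolterGetD, h1, h2, PySem.List.pyGet?_natCast]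
  rw [List.getElem?_eraseIdx, List.getElem?_eraseIdx, if_pos (by omega), if_pos (by omega)]

-- scanning may start anywhere inside a known-non-removable prefix
lemma jscan_eq_of_clean (arr : List Int) (a b : Nat) (hab : a ≤ b)
    (h : ∀ k, a ≤ k → k < b → jremovable arr (k : Int) = false) :
    jscan arr a = jscan arr b := by
  rcases Nat.lt_or_ge a b with hlt | hge
  · rw [jscan]
    rcases Nat.lt_or_ge (a + 1) arr.length with hl | hl
    · rw [if_pos hl, h a (le_refl _) hlt]
      simp only [Bool.false_eq_true, if_false]
      exact jscan_eq_of_clean arr (a + 1) b (by omega) (fun k hk1 hk2 => h k (by omega) hk2)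
    · rw [if_neg (by omega)]
      have hb : jscan arr b = none := by rw [jscan, if_neg (by omega)]
      rw [hb]
  · have hba : a = b := by omega
    rw [hba]
  termination_by b - a

-- A's while loop computes: 1 if no removable position ≥ index, else 2 · recv (erased list)
lemma jolterWhileA_eq (recv : List Int → Int) (arr : List Int) :
    ∀ (rem : Nat) (index : Int), 1 ≤ index →
      rem = ((arr.length : Int) - 1 - index).toNat →
      jolterWhileA recv arr rem index =
        match jscan arr index.toNat with
        | none => 1
        | some j => 2 * recv (arr.eraseIdx j) := by
  intro rem
  induction rem with
  | zero =>
      intro index hi hrem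
      have hnone : jscan arr index.toNat = none := by
        rw [jscan, if_neg (by omega)]
      rw [hnone, jolterWhileA]
  | succ rem ih =>
      intro index hi hrem
      rw [jolterWhileA]
      rw [if_pos (by omega)]
      by_cases hr : jolterGetD arr (index + 1) - jolterGetD arr (index - 1) ≤ 3
      · rw [if_pos (by omega)]
        have hiN : index = (index.toNat : Int) := by omega
        have hremN : jremovable arr ((index.toNat : Nat) : Int) = true := by
          rw [jremovable, ← hiN]; exact decide_eq_true hr
        have hscan : jscan arr index.toNat = some index.toNat := by
          rw [jscan, if_pos (by omega), hremN, if_pos rfl]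
        have hsl : PySem.List.slice arr none (some index) ++
            PySem.List.slice arr (some (index + 1)) none = arr.eraseIdx index.toNat := by
          rw [hiN, PySem.List.slice_to_natCast]
          rw [show ((index.toNat : Int) + 1) = ((index.toNat + 1 : Nat) : Int) by push_cast; ring]
          rw [PySem.List.slice_from_natCast, List.eraseIdx_eq_take_drop_succ,
            Int.toNat_natCast]
        rw [hsl, hscan]
        ring
      · rw [if_neg (by omega)]
        have hstep : jscan arr index.toNat = jscan arr (index.toNat + 1) := by
          rw [jscan, if_pos (by omega)]
          have hrf : jremovable arr ((index.toNat : Nat) : Int) = false := by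
            rw [jremovable, show ((index.toNat : Nat) : Int) = index by omega]
            simpa using hr
          rw [hrf]; simp
        have hN : (index + 1).toNat = index.toNat + 1 := by omega
        rw [ih (index + 1) (by omega) (by omega), hN, ← hstep]

-- one unfolding of A's recursion
lemma jolterGo_loop (fuel : Nat) (arr : List Int) (i : Nat) (hi : 1 ≤ i) :
    jolterGo (fuel + 1) arr (i : Int) =
      match jscan arr i with
      | none => 1
      | some j => 2 * jolterGo fuel (arr.eraseIdx j) 1 := by
  rw [jolterGo]
  rw [jolterWhileA_eq (fun arr' => jolterGo fuel arr' 1) arr _ (i : Int) (by exact_mod_cast hi) rfl]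
  rw [Int.toNat_natCast]

-- A equals 2 ^ jcnt whenever the fuel dominates the removal count
lemma jolterGo_eq_pow (fuel : Nat) :
    ∀ (arr : List Int) (i : Nat), 1 ≤ i → jcnt arr i < fuel →
      jolterGo fuel arr (i : Int) = 2 ^ jcnt arr i := by
  induction fuel with
  | zero => intro arr i _ h; omega
  | succ f ih =>
      intro arr i hi hf
      rw [jolterGo_loop f arr i hi]
      cases h : jscan arr i with
      | none => rw [jcnt_none h]; rfl
      | some j =>
          rw [jcnt_some h] at hf ⊢
          have hrec := ih (arr.eraseIdx j) 1 (le_refl _) (by omega)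
          rw [Nat.cast_one] at hrec
          simp only [hrec, pow_add, pow_one]

-- B's helper scans exactly like jscan
lemma jFirstRemovable_eq (arr : List Int) :
    ∀ (rem : Nat) (i : Int), 1 ≤ i → rem = ((arr.length : Int) - 1 - i).toNat →
      jFirstRemovable arr rem i =
        (match jscan arr i.toNat with
         | none => none
         | some j => some ((j : Nat) : Int)) := by
  intro rem
  induction rem with
  | zero =>
      intro i hi hrem
      have hnone : jscan arr i.toNat = none := by
        rw [jscan, if_neg (by omega)]
      rw [hnone, jFirstRemovable]
  | succ rem ih =>
      intro i hi hrem
      rw [jFirstRemovable]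
      rw [if_pos (by omega)]
      by_cases hr : jolterGetD arr (i + 1) - jolterGetD arr (i - 1) ≤ 3
      · rw [if_pos hr]
        have hiN : i = (i.toNat : Int) := by omega
        have hremN : jremovable arr ((i.toNat : Nat) : Int) = true := by
          rw [jremovable, ← hiN]; exact decide_eq_true hr
        have hscan : jscan arr i.toNat = some i.toNat := by
          rw [jscan, if_pos (by omega), hremN, if_pos rfl]
        rw [hscan]
        show some i = some ((i.toNat : Nat) : Int)
        rw [← hiN]
      · rw [if_neg hr]
        have hstep : jscan arr i.toNat = jscan arr (i.toNat + 1) := by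
          rw [jscan, if_pos (by omega)]
          have hrf : jremovable arr ((i.toNat : Nat) : Int) = false := by
            rw [jremovable, show ((i.toNat : Nat) : Int) = i by omega]
            simpa using hr
          rw [hrf]; simp
        have hN : (i + 1).toNat = i.toNat + 1 := by omega
        rw [ih (i + 1) (by omega) (by omega), hN, ← hstep]

-- B's phase-2 inner pass: scans forward from i, hands the first removable position to `next`
lemma jolterAltInner_eq (next : List Int → Int → Nat → Int) (arr : List Int) :
    ∀ (rem : Nat) (i : Int) (m : Nat), 1 ≤ i →
      rem = ((arr.length : Int) - 1 - i).toNat →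
      jolterAltInner next arr rem i m =
        match jscan arr i.toNat with
        | none => 2 ^ m
        | some j => next (arr.eraseIdx j) (max ((j : Int) - 1) 1) (m + 1) := by
  intro rem
  induction rem with
  | zero =>
      intro i m hi hrem
      have hnone : jscan arr i.toNat = none := by
        rw [jscan, if_neg (by omega)]
      rw [hnone, jolterAltInner]
  | succ rem ih =>
      intro i m hi hrem
      rw [jolterAltInner]
      rw [if_pos (by omega)]
      by_cases hr : jolterGetD arr (i + 1) - jolterGetD arr (i - 1) ≤ 3
      · rw [if_pos hr]
        have hiN : i = (i.toNat : Int) := by omega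
        have hremN : jremovable arr ((i.toNat : Nat) : Int) = true := by
          rw [jremovable, ← hiN]; exact decide_eq_true hr
        have hscan : jscan arr i.toNat = some i.toNat := by
          rw [jscan, if_pos (by omega), hremN, if_pos rfl]
        rw [hscan]
        simp only [← hiN]
      · rw [if_neg hr]
        have hstep : jscan arr i.toNat = jscan arr (i.toNat + 1) := by
          rw [jscan, if_pos (by omega)]
          have hrf : jremovable arr ((i.toNat : Nat) : Int) = false := by
            rw [jremovable, show ((i.toNat : Nat) : Int) = i by omega]
            simpa using hr
          rw [hrf]; simp
        have hN : (i + 1).toNat = i.toNat + 1 := by omega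
        rw [ih (i + 1) m (by omega) (by omega), hN, ← hstep]

-- B's phase-2 rounds: every pass scans from the backtracked pointer over a clean prefix,
-- giving 2^removals · 2^(remaining removal count)
lemma jolterAltOuter_eq : ∀ (r : Nat) (arr : List Int) (i : Int) (m : Nat), 1 ≤ i →
    (∀ k : Nat, 1 ≤ k → (k : Int) < i → jremovable arr (k : Int) = false) →
    jcnt arr 1 < r →
    jolterAltOuter r arr i m = 2 ^ m * 2 ^ jcnt arr 1 := by
  intro r
  induction r with
  | zero => intro arr i m _ _ h; omega
  | succ r ih =>
      intro arr i m hi hclean hr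
      rw [jolterAltOuter, jolterAltInner_eq _ arr _ i m hi rfl]
      have hsw : jscan arr 1 = jscan arr i.toNat :=
        jscan_eq_of_clean arr 1 i.toNat (by omega)
          (fun k hk1 hk2 => hclean k hk1 (by omega))
      cases h : jscan arr i.toNat with
      | none => rw [jcnt_none (hsw.trans h)]; ring
      | some j =>
          have hs := jscan_some h
          have hclean1 : ∀ k, 1 ≤ k → k < j → jremovable arr (k : Int) = false :=
            jscan_clean (hsw.trans h)
          have hclean' : ∀ k : Nat, 1 ≤ k → (k : Int) < max ((j : Int) - 1) 1 →
              jremovable (arr.eraseIdx j) (k : Int) = false := by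
            intro k hk1 hk2
            have hkj : k + 1 < j := by
              rcases max_cases ((j : Int) - 1) (1 : Int) with ⟨he, _⟩ | ⟨he, hle⟩ <;> omega
            rw [jremovable_eraseIdx arr j k hk1 hkj]
            exact hclean1 k hk1 (by omega)
          show jolterAltOuter r (arr.eraseIdx j) (max ((j : Int) - 1) 1) (m + 1) =
            2 ^ m * 2 ^ jcnt arr 1
          rw [ih (arr.eraseIdx j) (max ((j : Int) - 1) 1) (m + 1) (le_max_right _ _)
            hclean' (by have := jcnt_some (hsw.trans h); omega)]
          rw [jcnt_some (hsw.trans h), pow_add]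
          ring

-- B equals 2 ^ jcnt of the process started at index
lemma jolter_alt_eq_pow (arr : List Int) (index : Int) (hi : 1 ≤ index) :
    jolter_alt arr index = 2 ^ jcnt arr index.toNat := by
  unfold jolter_alt
  rw [jFirstRemovable_eq arr _ index hi rfl]
  cases h : jscan arr index.toNat with
  | none =>
      rw [jcnt_none h]
      show (1 : Int) = 2 ^ 0
      norm_num
  | some j =>
      show jolterAltOuter (arr.length + 1)
        (PySem.List.slice arr none (some ((j : Nat) : Int)) ++
         PySem.List.slice arr (some (((j : Nat) : Int) + 1)) none) 1 1 =
        2 ^ jcnt arr index.toNat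
      have hs := jscan_some h
      have hsl : PySem.List.slice arr none (some (j : Int)) ++
          PySem.List.slice arr (some ((j : Int) + 1)) none = arr.eraseIdx j := by
        rw [PySem.List.slice_to_natCast]
        rw [show ((j : Int) + 1) = ((j + 1 : Nat) : Int) by push_cast; ring]
        rw [PySem.List.slice_from_natCast, List.eraseIdx_eq_take_drop_succ]
      rw [hsl]
      have hlen : (arr.eraseIdx j).length = arr.length - 1 := by
        rw [List.length_eraseIdx, if_pos (by omega)]
      have hle := jcnt_le (arr.eraseIdx j).length (arr.eraseIdx j) 1 (le_refl _)
      rw [jolterAltOuter_eq (arr.length + 1) (arr.eraseIdx j) 1 1 (le_refl _)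
        (fun k hk1 hk2 => by omega) (by omega)]
      rw [jcnt_some h, pow_add]

-- ===== VERDICT (by name: the statement is the Claim_ definition above) =====
theorem jolter_spec : Claim_equal_jolter := by
  intro jolt_array index _hdom hpre
  unfold Spec_jolter jolter
  have hpre' : 1 ≤ index := hpre
  have hidx : index = (index.toNat : Int) := by omega
  have hle := jcnt_le jolt_array.length jolt_array index.toNat (le_refl _)
  rw [jolter_alt_eq_pow jolt_array index hpre', hidx]
  rw [jolterGo_eq_pow (jolt_array.length + 1) jolt_array index.toNat (by omega) (by omega)]
  rw [Int.toNat_natCast]
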